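-- pv_equiv track=rewrite | github.com/TheAlgorithms/Python | project_euler/problem_719/sol1.py | get_all_subset
-- ===== SOURCE A (Python) =====
-- def get_all_subset(iset: str, imax: int):
--     """
--     Get all digit splittings of n that, such that any part
--     of the split does not exceed imax digits.
--
--     iset - string repsentention of n.
--     imax - max digit count of every part.
--     """
--     def helper(cur_set, depth):
--         if len(cur_set)/(depth + 1) > imax:
--             yield None
--         elif depth == 0:
--             yield (cur_set,)
--         else:
--             for i in range(1, min(len(cur_set)-depth+1, imax+1)):
--                 for s in helper(cur_set[i:], depth-1):
--                     if s is not None: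
--                         yield (cur_set[:i], *s)
--
--     for j in range(1, len(iset)):
--         for subsets in helper(iset, j):
--             if subsets is not None:
--                 yield subsets
-- ===== SOURCE B (Python) =====
-- def get_all_subset(iset: str, imax: int):
--     """
--     Get all digit splittings of n such that no part of the split exceeds
--     imax digits.  Iterative breadth-first construction: for each part count
--     k (2..len(iset)), grow the list of partial splits layer by layer, one
--     part per layer, with feasibility bounds on each part's length so that
--     only completable prefixes are ever kept.
--     """
--     n = len(iset)
--     for k in range(2, n + 1):
--         states = [([], 0)]  # (parts so far, characters consumed)
--         for step in range(k):
--             rem = k - step - 1  # parts still to be produced after this one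
--             new_states = []
--             for parts, pos in states:
--                 lo = max(1, n - pos - rem * imax)
--                 hi = min(imax, n - pos - rem)
--                 for length in range(lo, hi + 1):
--                     new_states.append(
--                         (parts + [iset[pos:pos + length]], pos + length)
--                     )
--             states = new_states
--         for parts, _pos in states:
--             yield tuple(parts)
-- ===== Notes on version B (the rewrite author's own statement) =====
-- stated objective: alternative
-- what changed: Replaced the recursive None-yielding generator over string suffixes with an iterative breadth-first layer-by-layer construction: for each part count k, a worklist of partial splits is extended one part per layer under exact feasibility bounds (no sentinel filtering, no recursion).
import Mathlib
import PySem

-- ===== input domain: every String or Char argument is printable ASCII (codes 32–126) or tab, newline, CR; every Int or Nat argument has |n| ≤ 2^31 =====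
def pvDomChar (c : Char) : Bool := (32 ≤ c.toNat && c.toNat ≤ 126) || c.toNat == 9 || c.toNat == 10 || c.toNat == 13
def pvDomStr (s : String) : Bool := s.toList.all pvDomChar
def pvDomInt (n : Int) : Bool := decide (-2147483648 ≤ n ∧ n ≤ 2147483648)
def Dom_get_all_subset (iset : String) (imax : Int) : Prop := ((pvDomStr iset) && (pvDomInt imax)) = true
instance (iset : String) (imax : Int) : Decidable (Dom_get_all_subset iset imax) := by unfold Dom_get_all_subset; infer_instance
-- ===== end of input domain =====

-- B replaces A's recursive None-yielding generator by an iterative layer-by-layer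
-- construction of partial splits (an alternative of the same cost).

-- ===== PORT A =====
-- helper(cur_set, depth), the generator ported as the list of its yields, None as 'none'.
-- 'len(cur_set)/(depth+1) > imax' (float true division) is ported as the exact integer
-- comparison len > imax*(depth+1); for the lengths and |imax| ≤ 2^31 covered by Dom the
-- float comparison agrees with the exact one.
def pyA_helper (imax : Int) : Nat → List Char → List (Option (List String))
  | 0, cs =>
    if (cs.length : Int) > imax * ((0 : Int) + 1) then [none]
    else [some [String.ofList cs]]
  | d' + 1, cs =>
    if (cs.length : Int) > imax * (((d' : Int) + 1) + 1) then [none]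
    else
      (PySem.List.pyRange 1 (min ((cs.length : Int) - ((d' : Int) + 1) + 1) (imax + 1)) 1).flatMap
        (fun i =>
          (pyA_helper imax d' (PySem.List.slice cs (some i) none)).flatMap
            (fun s? =>
              match s? with
              | none => []
              | some s => [some (String.ofList (PySem.List.slice cs none (some i)) :: s)]))

def get_all_subset (iset : String) (imax : Int) : List (List String) :=
  (PySem.List.pyRange 1 (PySem.Str.len iset) 1).flatMap
    (fun j =>
      -- j ≥ 1 here, so j.toNat is exact
      (pyA_helper imax j.toNat iset.toList).flatMap
        (fun s? =>
          match s? with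
          | none => []
          | some s => [s]))

-- ===== PORT B =====
def get_all_subset_alt (iset : String) (imax : Int) : List (List String) :=
  let cs := iset.toList
  let n : Int := PySem.Str.len iset
  (PySem.List.pyRange 2 (n + 1) 1).flatMap
    (fun k =>
      (((PySem.List.pyRange 0 k 1).foldl
          (fun states step =>
            states.flatMap (fun st =>
              (PySem.List.pyRange (max 1 (n - st.2 - (k - step - 1) * imax))
                  (min imax (n - st.2 - (k - step - 1)) + 1) 1).map
                (fun l =>
                  (st.1 ++ [String.ofList (PySem.List.slice cs (some st.2) (some (st.2 + l)))],
                   st.2 + l))))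
          [(([] : List String), (0 : Int))]).map (·.1)))

-- ===== PRECONDITION & SPEC =====
def Spec_get_all_subset (iset : String) (imax : Int) (out : List (List String)) : Prop := out = get_all_subset_alt iset imax
instance (iset : String) (imax : Int) (out : List (List String)) : Decidable (Spec_get_all_subset iset imax out) := by unfold Spec_get_all_subset; infer_instance

-- ===== CLAIM (what is proved, stated in full; the proofs are below) =====
def Claim_equal_get_all_subset : Prop := ∀ (iset : String) (imax : Int), Dom_get_all_subset iset imax → Spec_get_all_subset iset imax (get_all_subset iset imax)

-- ===== LEMMAS AND PROOFS =====

-- part-length compositions of m into k parts, each within [1, imax], with the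
-- feasibility lower bound, in the order B enumerates them
def pvComps (imax : Int) : Int → Nat → List (List Int)
  | _, 0 => [[]]
  | m, j + 1 =>
    (PySem.List.pyRange (max 1 (m - (j : Int) * imax)) (min imax (m - (j : Int)) + 1) 1).flatMap
      (fun l => (pvComps imax (m - l) j).map (l :: ·))

-- cut a suffix into pieces of the given lengths
def pvCut : List Char → List Int → List String
  | _, [] => []
  | s, l :: ls => String.ofList (s.take l.toNat) :: pvCut (s.drop l.toNat) ls

-- B's state extension along a length list
def pvExt (cs : List Char) : (List String × Int) → List Int → (List String × Int)
  | st, [] => st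
  | st, l :: ls =>
    pvExt cs (st.1 ++ [String.ofList (PySem.List.slice cs (some st.2) (some (st.2 + l)))], st.2 + l) ls

-- B's layer function (the inline lambda of the port, named for the proofs)
def pvLayer (cs : List Char) (n imax k : Int) (states : List (List String × Int)) (step : Int) :
    List (List String × Int) :=
  states.flatMap (fun st =>
    (PySem.List.pyRange (max 1 (n - st.2 - (k - step - 1) * imax))
        (min imax (n - st.2 - (k - step - 1)) + 1) 1).map
      (fun l =>
        (st.1 ++ [String.ofList (PySem.List.slice cs (some st.2) (some (st.2 + l)))], st.2 + l)))

theorem pvComps_succ (imax m : Int) (j : Nat) :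
    pvComps imax m (j + 1) =
      (PySem.List.pyRange (max 1 (m - (j : Int) * imax)) (min imax (m - (j : Int)) + 1) 1).flatMap
        (fun l => (pvComps imax (m - l) j).map (l :: ·)) := rfl

theorem pvComps_nil (imax m : Int) (j : Nat) (h : m > imax * ((j : Int) + 1)) :
    pvComps imax m (j + 1) = [] := by
  rw [pvComps_succ, PySem.List.pyRange_one_eq_nil ?_]
  · rfl
  · have e : imax * ((j : Int) + 1) = (j : Int) * imax + imax := by ring
    have h2 : imax < m - (j : Int) * imax := by linarith [e ▸ h]
    linarith [le_max_right 1 (m - (j : Int) * imax), min_le_left imax (m - (j : Int))]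

theorem pvComps_pos (imax : Int) : ∀ (j : Nat) (m : Int), ∀ ls ∈ pvComps imax m j, ∀ l ∈ ls, 1 ≤ l := by
  intro j
  induction j with
  | zero => intro m ls hls l hl; simp [pvComps] at hls; subst hls; simp at hl
  | succ j ih =>
    intro m ls hls l hl
    rw [pvComps_succ] at hls
    simp only [List.mem_flatMap, List.mem_map] at hls
    obtain ⟨i, hi, ls', hls', rfl⟩ := hls
    rw [PySem.List.mem_pyRange_one] at hi
    rcases List.mem_cons.1 hl with rfl | hl'
    · omega
    · exact ih (m - i) ls' hls' l hl'

theorem pvExt_cut (cs : List Char) : ∀ (ls : List Int), (∀ l ∈ ls, 1 ≤ l) →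
    ∀ (st : List String × Int), 0 ≤ st.2 →
    pvExt cs st ls = (st.1 ++ pvCut (cs.drop st.2.toNat) ls, st.2 + ls.sum) := by
  intro ls
  induction ls with
  | nil => intro _ st _; simp [pvExt, pvCut]
  | cons l ls ih =>
    intro hpos st h0
    have hl : 1 ≤ l := hpos l (List.mem_cons_self ..)
    have hslice : PySem.List.slice cs (some st.2) (some (st.2 + l)) =
        (cs.drop st.2.toNat).take l.toNat := by
      rw [PySem.List.slice_toNat cs h0 (by omega)]
      congr 1
      omega
    have htn : (st.2 + l).toNat = st.2.toNat + l.toNat := by omega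
    rw [pvExt, ih (fun x hx => hpos x (List.mem_cons_of_mem _ hx)) _ (by simp; omega)]
    simp only [pvCut, hslice, List.sum_cons, Prod.mk.injEq, List.append_assoc,
      List.singleton_append, List.drop_drop, htn]
    exact ⟨trivial, by ring⟩

-- the fold of layers distributes over the list of states
theorem pvFold_append (cs : List Char) (n imax k : Int) :
    ∀ (steps : List Int) (xs ys : List (List String × Int)),
    steps.foldl (pvLayer cs n imax k) (xs ++ ys) =
      steps.foldl (pvLayer cs n imax k) xs ++ steps.foldl (pvLayer cs n imax k) ys := by
  intro steps
  induction steps with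
  | nil => intro xs ys; simp
  | cons s rest ih =>
    intro xs ys
    simp only [List.foldl_cons]
    rw [show pvLayer cs n imax k (xs ++ ys) s =
          pvLayer cs n imax k xs s ++ pvLayer cs n imax k ys s by
        simp [pvLayer, List.flatMap_append]]
    exact ih _ _

theorem pvFold_flatMap (cs : List Char) (n imax k : Int) (steps : List Int) :
    ∀ (states : List (List String × Int)),
    steps.foldl (pvLayer cs n imax k) states =
      states.flatMap (fun st => steps.foldl (pvLayer cs n imax k) [st]) := by
  intro states
  induction states with
  | nil =>
    simp only [List.flatMap_nil]
    induction steps with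
    | nil => rfl
    | cons s rest ih => simp only [List.foldl_cons, pvLayer, List.flatMap_nil]; exact ih
  | cons st rest ih =>
    rw [show (st :: rest) = [st] ++ rest from rfl, pvFold_append, ih]
    simp

-- B's fold from a single state computes the compositions extended onto that state
theorem pvLemB (cs : List Char) (n imax k : Int) :
    ∀ (t : Nat) (s : Int) (st : List String × Int), s + (t : Int) = k →
    (PySem.List.pyRange s k 1).foldl (pvLayer cs n imax k) [st] =
      (pvComps imax (n - st.2) t).map (pvExt cs st) := by
  intro t
  induction t with
  | zero =>
    intro s st hs
    rw [PySem.List.pyRange_one_eq_nil (by omega)]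
    simp [pvComps, pvExt]
  | succ t ih =>
    intro s st hs
    rw [PySem.List.pyRange_one_cons (by omega), List.foldl_cons]
    have hlayer : pvLayer cs n imax k [st] s =
        (PySem.List.pyRange (max 1 (n - st.2 - (t : Int) * imax))
            (min imax (n - st.2 - (t : Int)) + 1) 1).map
          (fun l =>
            (st.1 ++ [String.ofList (PySem.List.slice cs (some st.2) (some (st.2 + l)))], st.2 + l)) := by
      simp only [pvLayer, List.flatMap_cons, List.flatMap_nil, List.append_nil]
      rw [show k - s - 1 = (t : Int) from by omega]
    rw [hlayer, pvFold_flatMap, List.flatMap_map, pvComps_succ, List.map_flatMap]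
    apply List.flatMap_congr
    intro l _
    rw [List.map_map, show n - st.2 - l = n - (st.2 + l) from by ring,
      ih (s + 1) _ (by omega)]
    rfl

-- A's pruning: a suffix longer than imax*(depth+1) contributes nothing
theorem pvA_prune (imax : Int) (d : Nat) (cs : List Char)
    (h : (cs.length : Int) > imax * ((d : Int) + 1)) :
    pyA_helper imax d cs = [none] := by
  cases d with
  | zero => rw [pyA_helper, if_pos (by simpa using h)]
  | succ d' => rw [pyA_helper, if_pos (by push_cast at h ⊢; linarith)]

-- the match-filter of A's generator is filterMap id
theorem pvFilterMatch (l : List (Option (List String))) :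
    (l.flatMap (fun s? => match s? with | none => [] | some s => [s])) = l.filterMap id := by
  induction l with
  | nil => rfl
  | cons x rest ih => cases x <;> simp [List.flatMap_cons, ih]

-- A's helper, with Nones filtered, computes the compositions cut into pieces
theorem pvLemA (imax : Int) : ∀ (d : Nat) (cs : List Char), (d : Int) < (cs.length : Int) →
    (pyA_helper imax d cs).filterMap id =
      (pvComps imax (cs.length : Int) (d + 1)).map (pvCut cs) := by
  intro d
  induction d with
  | zero =>
    intro cs hlen
    rw [pyA_helper]
    by_cases h : (cs.length : Int) > imax * ((0 : Int) + 1)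
    · rw [if_pos h, pvComps_nil imax _ 0 (by simpa using h)]
      rfl
    · rw [if_neg h]
      have h1 : pvComps imax (cs.length : Int) 1 = [[(cs.length : Int)]] := by
        rw [pvComps_succ]
        simp only [Nat.cast_zero, zero_mul, sub_zero]
        rw [show max 1 ((cs.length : Int)) = (cs.length : Int) from by omega,
          show min imax ((cs.length : Int)) + 1 = (cs.length : Int) + 1 from by omega,
          PySem.List.pyRange_one_singleton]
        rfl
      rw [h1]
      simp [pvCut]
  | succ d ih =>
    intro cs hlen
    rw [pyA_helper]
    by_cases h : (cs.length : Int) > imax * (((d : Int) + 1) + 1)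
    · rw [if_pos h, pvComps_nil imax _ (d + 1) (by push_cast; linarith)]
      rfl
    · rw [if_neg h]
      rw [not_lt] at h
      have hm1 : (1 : Int) ≤ (cs.length : Int) := by omega
      have himax : 1 ≤ imax := by
        by_cases h' : 1 ≤ imax
        · exact h'
        · exfalso
          rw [not_le] at h'
          have : imax * (((d : Int) + 1) + 1) ≤ 0 :=
            mul_nonpos_of_nonpos_of_nonneg (by omega) (by positivity)
          omega
      have hdm : ((d : Int) + 1) * 1 ≤ ((d : Int) + 1) * imax :=
        mul_le_mul_of_nonneg_left himax (by positivity)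
      have he : imax * (((d : Int) + 1) + 1) = ((d : Int) + 1) * imax + imax := by ring
      rw [List.filterMap_flatMap]
      have hstep : ∀ i ∈ PySem.List.pyRange 1 (min ((cs.length : Int) - ((d : Int) + 1) + 1) (imax + 1)) 1,
          ((pyA_helper imax d (PySem.List.slice cs (some i) none)).flatMap
              (fun s? => match s? with
                | none => []
                | some s => [some (String.ofList (PySem.List.slice cs none (some i)) :: s)])).filterMap id =
            (if i < max 1 ((cs.length : Int) - ((d : Int) + 1) * imax) then []
            else (pvComps imax ((cs.length : Int) - i) (d + 1)).map
              (fun ls => pvCut cs (i :: ls))) := by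
        intro i hi
        rw [PySem.List.mem_pyRange_one] at hi
        have hi0 : 0 ≤ i := by omega
        have hdrop : PySem.List.slice cs (some i) none = cs.drop i.toNat :=
          PySem.List.slice_from cs hi0
        have htake : PySem.List.slice cs none (some i) = cs.take i.toNat :=
          PySem.List.slice_to cs hi0
        have hlen2 : ((cs.drop i.toNat).length : Int) = (cs.length : Int) - i := by
          simp [List.length_drop]
          omega
        by_cases hlow : i < max 1 ((cs.length : Int) - ((d : Int) + 1) * imax)
        · have hX : i < (cs.length : Int) - ((d : Int) + 1) * imax := by
            rcases max_cases 1 ((cs.length : Int) - ((d : Int) + 1) * imax) with ⟨hq, _⟩ | ⟨hq, _⟩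
            · rw [hq] at hlow; linarith [hi.1]
            · rwa [hq] at hlow
          have hsub : pyA_helper imax d (cs.drop i.toNat) = [none] := by
            apply pvA_prune
            rw [hlen2]
            linarith [mul_comm ((d : Int) + 1) imax ▸ hX]
          rw [if_pos hlow, hdrop, hsub]
          rfl
        · rw [if_neg hlow, hdrop, htake]
          have hinv : ((d : Int)) < ((cs.drop i.toNat).length : Int) := by
            rw [hlen2]; omega
          calc ((pyA_helper imax d (cs.drop i.toNat)).flatMap
                  (fun s? => match s? with
                    | none => []
                    | some s => [some (String.ofList (cs.take i.toNat) :: s)])).filterMap id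
              = ((pyA_helper imax d (cs.drop i.toNat)).filterMap id).map
                  (fun s => String.ofList (cs.take i.toNat) :: s) := by
                induction pyA_helper imax d (cs.drop i.toNat) with
                | nil => rfl
                | cons x rest ihx => cases x <;> simp_all
            _ = (pvComps imax ((cs.length : Int) - i) (d + 1)).map
                  (fun ls => pvCut cs (i :: ls)) := by
                rw [ih _ hinv, hlen2, List.map_map]
                apply List.map_congr_left
                intro ls _
                simp [pvCut]
      rw [List.flatMap_congr hstep]
      have hlen' : ((d : Int) + 1) < (cs.length : Int) := by push_cast at hlen; linarith
      have hA : max 1 ((cs.length : Int) - ((d : Int) + 1) * imax) ≤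
          min imax ((cs.length : Int) - ((d : Int) + 1)) + 1 := by
        rw [he] at h
        have h1 : (cs.length : Int) - ((d : Int) + 1) * imax - 1 ≤ imax := by linarith
        have h2 : (cs.length : Int) - ((d : Int) + 1) * imax - 1 ≤
            (cs.length : Int) - ((d : Int) + 1) := by linarith
        have h3 : (0 : Int) ≤ min imax ((cs.length : Int) - ((d : Int) + 1)) :=
          le_min (by linarith) (by linarith)
        have h4 := le_min h1 h2
        exact max_le (by linarith) (by linarith)
      have hends : min ((cs.length : Int) - ((d : Int) + 1) + 1) (imax + 1) =
          min imax ((cs.length : Int) - ((d : Int) + 1)) + 1 := by omega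
      rw [hends, PySem.List.pyRange_one_append 1 (max 1 ((cs.length : Int) - ((d : Int) + 1) * imax))
        (min imax ((cs.length : Int) - ((d : Int) + 1)) + 1) (by omega) hA, List.flatMap_append]
      have hlow0 : (PySem.List.pyRange 1 (max 1 ((cs.length : Int) - ((d : Int) + 1) * imax)) 1).flatMap
          (fun i => (if i < max 1 ((cs.length : Int) - ((d : Int) + 1) * imax) then []
            else (pvComps imax ((cs.length : Int) - i) (d + 1)).map (fun ls => pvCut cs (i :: ls)))) = [] := by
        rw [List.flatMap_eq_nil_iff]
        intro i hi
        rw [PySem.List.mem_pyRange_one] at hi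
        rw [if_pos (by omega)]
      rw [hlow0, List.nil_append,
        show d + 1 + 1 = (d + 1) + 1 from rfl, pvComps_succ, List.map_flatMap]
      push_cast
      apply List.flatMap_congr
      intro i hi
      rw [PySem.List.mem_pyRange_one] at hi
      rw [if_neg (not_lt.mpr hi.1), List.map_map]
      rfl

theorem pv_main (iset : String) (imax : Int) :
    get_all_subset iset imax = get_all_subset_alt iset imax := by
  unfold get_all_subset get_all_subset_alt
  simp only [PySem.Str.len_eq]
  refine Eq.trans (List.flatMap_congr (l := PySem.List.pyRange 1 (iset.toList.length : Int) 1)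
      (g := fun j => (pvComps imax (iset.toList.length : Int) (j.toNat + 1)).map (pvCut iset.toList)) ?hA)
    (Eq.trans ?mid (List.flatMap_congr (l := PySem.List.pyRange 2 ((iset.toList.length : Int) + 1) 1)
      (g := fun k => (pvComps imax (iset.toList.length : Int) k.toNat).map (pvCut iset.toList)) ?hB).symm)
  case hA =>
    intro j hj
    rw [PySem.List.mem_pyRange_one] at hj
    rw [pvFilterMatch, pvLemA imax j.toNat iset.toList (by omega)]
  case hB =>
    intro k hk
    rw [PySem.List.mem_pyRange_one] at hk
    show ((PySem.List.pyRange 0 k 1).foldl (pvLayer iset.toList (iset.toList.length : Int) imax k)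
        [(([] : List String), (0 : Int))]).map (·.1) = _
    rw [pvLemB iset.toList (iset.toList.length : Int) imax k k.toNat 0 _ (by omega), List.map_map]
    apply List.map_congr_left
    intro ls hls
    have hpos : ∀ l ∈ ls, 1 ≤ l :=
      pvComps_pos imax k.toNat ((iset.toList.length : Int) - 0) ls hls
    rw [Function.comp_apply, pvExt_cut iset.toList ls hpos _ (by simp)]
    simp
  case mid =>
    rw [PySem.List.pyRange_one 1 (iset.toList.length : Int),
      PySem.List.pyRange_one 2 ((iset.toList.length : Int) + 1),
      List.flatMap_map, List.flatMap_map,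
      show ((iset.toList.length : Int) + 1 - 2).toNat = ((iset.toList.length : Int) - 1).toNat from by omega]
    apply List.flatMap_congr
    intro r _
    have : (1 + (r : Int)).toNat + 1 = (2 + (r : Int)).toNat := by omega
    rw [this]

-- ===== VERDICT (by name: the statement is the Claim_ definition above) =====
theorem get_all_subset_spec : Claim_equal_get_all_subset := by
  intro iset imax _
  unfold Spec_get_all_subset
  exact pv_main iset imax
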